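-- pv_equiv track=rewrite | github.com/kiwoook/codingtest | 프로그래머스/단속카메라.py | solution_failed
-- ===== SOURCE A (Python) =====
-- from itertools import combinations
--
-- def solution_failed(routes):
--     list_set = list()
--     len_routes = len(routes)
--     for idx_1, route_1 in enumerate(routes):
--         for idx_2, route_2 in enumerate(routes):
--             if idx_1 != idx_2 and idx_1 < idx_2:
--                 if route_1[1] >= route_2[0]:
--                     list_set.append({idx_1, idx_2})
--     for i in range(1, len_routes + 1):
--         comb_list = (list(combinations(list_set, i)))
--         hap_list = []
--         for comb in comb_list:
--             hap_set = set([])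
--             for c in comb:
--                 hap_set.update(c)
--             hap_list.append(hap_set)
--
--         for hap in hap_list:
--             if len(hap) == len_routes:
--                 return i
--
--     return len_routes + 1
-- ===== SOURCE B (Python) =====
-- def solution_failed(routes):
--     n = len(routes)
--     edges = []
--     for i in range(n):
--         for j in range(i + 1, n):
--             if routes[i][1] >= routes[j][0]:
--                 edges.append((1 << i) | (1 << j))
--     full = (1 << n) - 1
--     reach = {0}
--     for i in range(1, n + 1):
--         reach = {s | e for s in reach for e in edges}
--         if full in reach:
--             return i
--     return n + 1
-- ===== Notes on version B (the rewrite author's own statement) =====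
-- stated objective: alternative
-- what changed: A enumerates all size-i combinations of overlap-pair sets for growing i and checks each union; B runs a breadth-first reachability DP on bitmasks of covered route indices (reach_i = unions of i pairs), returning the first i whose reachable set contains the full mask.
import Mathlib
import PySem

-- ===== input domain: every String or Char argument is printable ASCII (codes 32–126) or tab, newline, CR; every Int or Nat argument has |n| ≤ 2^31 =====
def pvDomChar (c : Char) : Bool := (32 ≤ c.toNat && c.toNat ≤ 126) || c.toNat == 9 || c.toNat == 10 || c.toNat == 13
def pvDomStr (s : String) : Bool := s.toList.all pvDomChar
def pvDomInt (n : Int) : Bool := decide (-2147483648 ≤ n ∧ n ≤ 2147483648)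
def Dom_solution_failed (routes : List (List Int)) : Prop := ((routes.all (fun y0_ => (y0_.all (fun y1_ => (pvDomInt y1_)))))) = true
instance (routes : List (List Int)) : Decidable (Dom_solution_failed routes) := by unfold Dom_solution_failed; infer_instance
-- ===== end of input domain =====

-- B replaces A's enumeration of all size-i combinations of overlap pairs by a breadth-first
-- reachability DP over bitmasks of covered route indices (objective: alternative algorithm).

-- ===== PORT A =====
-- A-side helper: the 'for i in range(1, len_routes+1): … return i' loop with its early return.
def solFailedLoopA (list_set : List (PySem.Set Int)) (n : Nat) : List Int → Int
  | [] => (n : Int) + 1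
  | i :: rest =>
    let comb_list := PySem.List.combinations list_set i.toNat
    let hap_list := comb_list.map (fun comb =>
      comb.foldl (fun hap c => PySem.Set.update hap c) PySem.Set.empty)
    if hap_list.any (fun hap => hap.length == n) then i else solFailedLoopA list_set n rest

-- A-side helper: the double 'enumerate' loop building list_set.  The '.getD 0' after pyGet? is
-- reached only where Python would raise IndexError (excluded by Pre_): there the value is arbitrary.
def solFailedListSet (routes : List (List Int)) : List (PySem.Set Int) :=
  (PySem.List.enumerate routes).foldl (fun acc p1 =>
    (PySem.List.enumerate routes).foldl (fun acc2 p2 =>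
      if p1.1 ≠ p2.1 ∧ p1.1 < p2.1 then
        if (PySem.List.pyGet? p1.2 1).getD 0 ≥ (PySem.List.pyGet? p2.2 0).getD 0 then
          acc2 ++ [PySem.Set.ofList [p1.1, p2.1]]
        else acc2
      else acc2) acc) []

def solution_failed (routes : List (List Int)) : Int :=
  solFailedLoopA (solFailedListSet routes) routes.length
    (PySem.List.pyRange 1 ((routes.length : Int) + 1) 1)

-- ===== PORT B =====
-- B-side helper: 'for i in range(1, n+1): reach = {s|e …}; if full in reach: return i'.
def solFailedLoopB (edges : List Nat) (full : Nat) (n : Nat) (reach : PySem.Set Nat) :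
    List Int → Int
  | [] => (n : Int) + 1
  | i :: rest =>
    let reach' : PySem.Set Nat :=
      PySem.Set.ofList (reach.flatMap (fun s => edges.map (fun e => s ||| e)))
    if PySem.Set.contains reach' full then i else solFailedLoopB edges full n reach' rest

-- B-side helper: the edge-mask build ('for i in range(n): for j in range(i+1, n): …').
-- The loop indices are the nonnegative ints range(n) / range(i+1, n), written as Nat ranges;
-- 'routes.getD i []' is routes[i] (i < n always holds), and '.getD 0' after pyGet? is reached
-- only where Python would raise IndexError (excluded by Pre_).
def solFailedEdges (routes : List (List Int)) : List Nat :=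
  (List.range routes.length).foldl (fun acc i =>
    (List.range' (i+1) (routes.length - (i+1))).foldl (fun acc2 j =>
      if (PySem.List.pyGet? (routes.getD i []) 1).getD 0 ≥
         (PySem.List.pyGet? (routes.getD j []) 0).getD 0 then
        acc2 ++ [(1 <<< i) ||| (1 <<< j)]
      else acc2) acc) []

def solution_failed_alt (routes : List (List Int)) : Int :=
  let n := routes.length
  solFailedLoopB (solFailedEdges routes) ((1 <<< n) - 1) n (PySem.Set.ofList [0])
    (PySem.List.pyRange 1 ((n : Int) + 1) 1)

-- ===== PRECONDITION & SPEC =====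
-- Pre_ is exactly where Python A returns: with ≥ 2 routes it reads routes[i][1] for every i
-- except the last and routes[j][0] for every j except the first, so every route but the last
-- needs length ≥ 2 and the last needs length ≥ 1 (with ≤ 1 routes nothing is indexed).
def Pre_solution_failed (routes : List (List Int)) : Prop :=
  routes.length ≤ 1 ∨
    ((∀ r ∈ routes.dropLast, 2 ≤ r.length) ∧ ∀ r ∈ routes.getLast?.toList, 1 ≤ r.length)
instance (routes : List (List Int)) : Decidable (Pre_solution_failed routes) := by
  unfold Pre_solution_failed; infer_instance

def pvWitness_solution_failed : List (List Int) := [[1, 3], [2, 5], [7, 9]]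

def Spec_solution_failed (routes : List (List Int)) (out : Int) : Prop :=
  out = solution_failed_alt routes
instance (routes : List (List Int)) (out : Int) : Decidable (Spec_solution_failed routes out) := by
  unfold Spec_solution_failed; infer_instance

-- ===== CLAIM (what is proved, stated in full; the proofs are below) =====
def Claim_equal_solution_failed : Prop := ∀ (routes : List (List Int)), Dom_solution_failed routes → Pre_solution_failed routes → Spec_solution_failed routes (solution_failed routes)

-- ===== LEMMAS AND PROOFS =====

-- The shared skeleton of both edge builds: the overlap test and the list of index pairs.
def sfCond (routes : List (List Int)) (i j : Nat) : Bool :=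
  decide ((PySem.List.pyGet? (routes.getD i []) 1).getD 0 ≥
          (PySem.List.pyGet? (routes.getD j []) 0).getD 0)

def sfPairs (routes : List (List Int)) : List (Nat × Nat) :=
  (List.range routes.length).flatMap (fun i =>
    ((List.range' (i+1) (routes.length - (i+1))).filter (fun j => sfCond routes i j)).map
      (fun j => (i, j)))

def sfMaskF (p : Nat × Nat) : Nat := (1 <<< p.1) ||| (1 <<< p.2)
def sfSetF (p : Nat × Nat) : PySem.Set Int := PySem.Set.ofList [(p.1 : Int), (p.2 : Int)]

-- S covers all n route indices through its pair endpoints.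
def sfCovers (n : Nat) (S : List (Nat × Nat)) : Prop :=
  ∀ v, v < n → ∃ p ∈ S, v = p.1 ∨ v = p.2

-- membership characterisation of the reach set after k rounds of B's loop
def sfReachInv (edges : List Nat) (k : Nat) (reach : PySem.Set Nat) : Prop :=
  ∀ x, x ∈ reach ↔ ∃ l : List Nat, l.length = k ∧ (∀ e ∈ l, e ∈ edges) ∧ l.foldl (· ||| ·) 0 = x

-- A's success test at size k, as a proposition
def sfPA (list_set : List (PySem.Set Int)) (n : Nat) (k : Nat) : Prop :=
  ∃ c ∈ PySem.List.combinations list_set k,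
    (c.foldl (fun hap s => PySem.Set.update hap s) PySem.Set.empty).length = n

lemma sfEnumerate_eq {α : Type} (xs : List α) (d : α) :
    PySem.List.enumerate xs
      = (List.range xs.length).map (fun (k : Nat) => ((k : Int), xs.getD k d)) := by
  apply List.ext_getElem?
  intro k
  simp only [PySem.List.getElem?_enumerate, List.getElem?_map]
  by_cases h : k < xs.length
  · simp only [List.getElem?_range h, Option.map_some, List.getElem?_eq_getElem h]
    simp [List.getElem?_eq_getElem h]
  · simp [show xs.length ≤ k by omega]

lemma sfFilterRange (n k1 : Nat) (q : Nat → Bool) (hk : k1 < n) :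
    (List.range n).filter (fun k2 => decide (k1 < k2) && q k2)
      = (List.range' (k1+1) (n - (k1+1))).filter q := by
  obtain ⟨m, rfl⟩ : ∃ m, n = (k1+1) + m := ⟨n - (k1+1), by omega⟩
  rw [Nat.add_sub_cancel_left, List.range_eq_range', ← List.range'_append_1, List.filter_append]
  have h1 : (List.range' 0 (k1+1)).filter (fun k2 => decide (k1 < k2) && q k2) = [] := by
    rw [List.filter_eq_nil_iff]
    intro a ha
    simp only [List.mem_range'_1] at ha
    simp [show ¬ (k1 < a) by omega]
  rw [h1, List.nil_append]
  simp only [Nat.zero_add]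
  apply List.filter_congr
  intro a ha
  simp only [List.mem_range'_1] at ha
  simp [show k1 < a by omega]

lemma sfEdges_eq (routes : List (List Int)) :
    solFailedEdges routes = (sfPairs routes).map sfMaskF := by
  unfold solFailedEdges
  have hinner : ∀ (i : Nat) (acc : List Nat),
      (List.range' (i+1) (routes.length - (i+1))).foldl (fun acc2 j =>
        if (PySem.List.pyGet? (routes.getD i []) 1).getD 0 ≥
           (PySem.List.pyGet? (routes.getD j []) 0).getD 0 then
          acc2 ++ [(1 <<< i) ||| (1 <<< j)]
        else acc2) acc
      = acc ++ ((List.range' (i+1) (routes.length - (i+1))).filter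
          (fun j => sfCond routes i j)).map (fun j => (1 <<< i) ||| (1 <<< j)) := by
    intro i acc
    rw [PySem.List.foldl_append_ite
      (p := fun j => (PySem.List.pyGet? (routes.getD i []) 1).getD 0 ≥
        (PySem.List.pyGet? (routes.getD j []) 0).getD 0)
      (f := fun j => (1 <<< i) ||| (1 <<< j))]
    rfl
  refine (PySem.List.foldl_congr_mem _ _ (fun acc i => acc ++
      ((List.range' (i+1) (routes.length - (i+1))).filter (fun j => sfCond routes i j)).map
        (fun j => (1 <<< i) ||| (1 <<< j))) _ (fun acc x _ => hinner x acc)).trans ?_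
  rw [PySem.List.foldl_append_eq_flatMap]
  simp only [sfPairs, List.map_flatMap, List.map_map]
  rfl

lemma sfListSet_eq (routes : List (List Int)) :
    solFailedListSet routes = (sfPairs routes).map sfSetF := by
  unfold solFailedListSet
  rw [sfEnumerate_eq routes []]
  rw [List.foldl_map]
  have hinner : ∀ (k1 : Nat) (acc : List (PySem.Set Int)), k1 ∈ List.range routes.length →
      ((List.range routes.length).map (fun (k : Nat) => ((k : Int), routes.getD k []))).foldl
        (fun acc2 p2 =>
          if ((k1:Int), routes.getD k1 []).1 ≠ p2.1 ∧ ((k1:Int), routes.getD k1 []).1 < p2.1 then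
            if (PySem.List.pyGet? ((k1:Int), routes.getD k1 []).2 1).getD 0 ≥
               (PySem.List.pyGet? p2.2 0).getD 0 then
              acc2 ++ [PySem.Set.ofList [((k1:Int), routes.getD k1 []).1, p2.1]]
            else acc2
          else acc2) acc
      = acc ++ ((List.range' (k1+1) (routes.length - (k1+1))).filter
          (fun j => sfCond routes k1 j)).map (fun j => sfSetF (k1, j)) := by
    intro k1 acc hk1
    rw [List.foldl_map]
    have hbody : ∀ (acc2 : List (PySem.Set Int)) (k2 : Nat), k2 ∈ List.range routes.length →
        (if ((k1:Int), routes.getD k1 []).1 ≠ ((k2:Int), routes.getD k2 []).1 ∧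
            ((k1:Int), routes.getD k1 []).1 < ((k2:Int), routes.getD k2 []).1 then
          if (PySem.List.pyGet? ((k1:Int), routes.getD k1 []).2 1).getD 0 ≥
             (PySem.List.pyGet? ((k2:Int), routes.getD k2 []).2 0).getD 0 then
            acc2 ++ [PySem.Set.ofList [((k1:Int), routes.getD k1 []).1,
              ((k2:Int), routes.getD k2 []).1]]
          else acc2
        else acc2)
        = if decide (k1 < k2) && sfCond routes k1 k2 then acc2 ++ [sfSetF (k1, k2)] else acc2 := by
      intro acc2 k2 _
      simp only [sfCond, sfSetF]
      by_cases h1 : k1 < k2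
      · have hne : ((k1:Int)) ≠ ((k2:Int)) := by exact_mod_cast Nat.ne_of_lt h1
        have hlt : ((k1:Int)) < ((k2:Int)) := by exact_mod_cast h1
        exact (by simp [h1, hne, hlt])
      · have hno : ¬ (((k1:Int)) ≠ ((k2:Int)) ∧ ((k1:Int)) < ((k2:Int))) := by
          rintro ⟨-, hlt⟩; exact h1 (by exact_mod_cast hlt)
        simp [h1]
    refine (PySem.List.foldl_congr_mem _ _
      (fun acc2 k2 =>
        if decide (k1 < k2) && sfCond routes k1 k2 then acc2 ++ [sfSetF (k1, k2)] else acc2)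
      _ (fun acc2 x hx => hbody acc2 x hx)).trans ?_
    rw [PySem.List.foldl_append_if (p := fun k2 => decide (k1 < k2) && sfCond routes k1 k2)
      (f := fun k2 => sfSetF (k1, k2))]
    rw [sfFilterRange _ _ _ (by simpa using hk1)]
  refine (PySem.List.foldl_congr_mem _ _
    (fun acc k1 => acc ++ ((List.range' (k1+1) (routes.length - (k1+1))).filter
        (fun j => sfCond routes k1 j)).map (fun j => sfSetF (k1, j)))
    _ (fun acc x hx => hinner x acc hx)).trans ?_
  rw [PySem.List.foldl_append_eq_flatMap]
  simp only [sfPairs, List.map_flatMap, List.map_map]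
  rfl

lemma sfPairs_bounds (routes : List (List Int)) :
    ∀ p ∈ sfPairs routes, p.1 < p.2 ∧ p.2 < routes.length := by
  intro p hp
  simp only [sfPairs, List.mem_flatMap, List.mem_map, List.mem_filter, List.mem_range,
    List.mem_range'_1] at hp
  obtain ⟨i, hi, j, ⟨⟨hj1, hj2⟩, -⟩, rfl⟩ := hp
  omega

lemma sfPairs_nodup (routes : List (List Int)) : (sfPairs routes).Nodup := by
  rw [sfPairs, List.nodup_flatMap]
  constructor
  · intro i _
    exact (List.nodup_map_iff_inj_on (List.Nodup.filter _ List.nodup_range')).mpr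
      (fun x _ y _ h => by simpa using congrArg Prod.snd h)
  · refine List.Pairwise.imp ?_ List.nodup_range
    intro a b hab x hxa hxb
    simp only [List.mem_map, List.mem_filter] at hxa hxb
    obtain ⟨ja, -, rfl⟩ := hxa
    obtain ⟨jb, -, heq⟩ := hxb
    exact hab (congrArg Prod.fst heq).symm

lemma testBit_foldl_or (l : List Nat) (a v : Nat) :
    (l.foldl (· ||| ·) a).testBit v = (a.testBit v || l.any (fun e => e.testBit v)) := by
  induction l generalizing a with
  | nil => simp
  | cons e t ih => simp [ih, Nat.testBit_or, Bool.or_assoc]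

lemma testBit_sfMaskF (p : Nat × Nat) (v : Nat) :
    (sfMaskF p).testBit v = (decide (v = p.1) || decide (v = p.2)) := by
  simp [sfMaskF, Nat.testBit_or, Nat.one_shiftLeft, Nat.testBit_two_pow, eq_comm]

lemma nodup_length_le {α : Type} [DecidableEq α] (l₁ l₂ : List α)
    (h : l₁.Nodup) (hs : l₁ ⊆ l₂) : l₁.length ≤ l₂.length :=
  calc l₁.length = l₁.toFinset.card := (List.toFinset_card_of_nodup h).symm
    _ ≤ l₂.toFinset.card := Finset.card_le_card (fun x hx => by
        simp only [List.mem_toFinset] at *; exact hs hx)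
    _ ≤ l₂.length := l₂.toFinset_card_le

lemma coverB_iff (n : Nat) (S : List (Nat × Nat)) (hb : ∀ p ∈ S, p.1 < n ∧ p.2 < n) :
    ((S.map sfMaskF).foldl (· ||| ·) 0 = (1 <<< n) - 1) ↔ sfCovers n S := by
  have hbit : ∀ v : Nat, ((S.map sfMaskF).foldl (· ||| ·) 0).testBit v
      = decide (∃ p ∈ S, v = p.1 ∨ v = p.2) := by
    intro v
    simp only [testBit_foldl_or, Nat.zero_testBit, Bool.false_or, List.any_map,
      Function.comp_def, testBit_sfMaskF]
    by_cases hex : ∃ p ∈ S, v = p.1 ∨ v = p.2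
    · simp only [hex, decide_true, List.any_eq_true]
      obtain ⟨p, hp, h⟩ := hex
      exact ⟨p, hp, by simpa using h⟩
    · simp only [hex, decide_false, List.any_eq_false]
      intro p hp
      simp only [Bool.or_eq_true, decide_eq_true_eq, not_or]
      constructor <;> · intro h; exact hex ⟨p, hp, by simp [h]⟩
  constructor
  · intro h v hv
    have h2 := congrArg (fun z => Nat.testBit z v) h
    simp only [hbit, Nat.one_shiftLeft, Nat.testBit_two_pow_sub_one] at h2
    rw [show (decide (v < n)) = true by simpa using hv] at h2
    simpa using h2.symm
  · intro h
    apply Nat.eq_of_testBit_eq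
    intro v
    rw [hbit, Nat.one_shiftLeft, Nat.testBit_two_pow_sub_one]
    by_cases hv : v < n
    · simp only [hv, decide_true, decide_eq_true_eq]
      exact h v hv
    · simp only [hv, decide_false, decide_eq_false_iff_not]
      rintro ⟨p, hp, hvp⟩
      have := hb p hp
      omega

lemma mem_foldl_update (cs : List (PySem.Set Int)) (s : PySem.Set Int) (x : Int) :
    x ∈ cs.foldl (fun hap c => PySem.Set.update hap c) s ↔ x ∈ s ∨ ∃ c ∈ cs, x ∈ c := by
  induction cs generalizing s with
  | nil => simp
  | cons c t ih =>
    simp only [List.foldl_cons, ih, PySem.Set.mem_update, List.mem_cons]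
    constructor
    · rintro (⟨h | h⟩ | ⟨c', hc', hx⟩)
      · exact Or.inl h
      · exact Or.inr ⟨c, Or.inl rfl, h⟩
      · exact Or.inr ⟨c', Or.inr hc', hx⟩
    · rintro (h | ⟨c', (rfl | hc'), hx⟩)
      · exact Or.inl (Or.inl h)
      · exact Or.inl (Or.inr hx)
      · exact Or.inr ⟨c', hc', hx⟩

lemma nodup_foldl_update (cs : List (PySem.Set Int)) (s : PySem.Set Int) (h : s.Nodup) :
    (cs.foldl (fun hap c => PySem.Set.update hap c) s).Nodup := by
  induction cs generalizing s with
  | nil => simpa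
  | cons c t ih => exact ih _ (PySem.Set.nodup_update _ _ h)

lemma coverA_iff (n : Nat) (S : List (Nat × Nat)) (hb : ∀ p ∈ S, p.1 < n ∧ p.2 < n) :
    ((S.map sfSetF).foldl (fun hap c => PySem.Set.update hap c) PySem.Set.empty).length = n
      ↔ sfCovers n S := by
  set H := (S.map sfSetF).foldl (fun hap c => PySem.Set.update hap c) PySem.Set.empty with hH
  have hmem : ∀ x : Int, x ∈ H ↔ ∃ p ∈ S, x = (p.1 : Int) ∨ x = (p.2 : Int) := by
    intro x
    rw [hH, mem_foldl_update]
    constructor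
    · rintro (hx | ⟨c, hc, hxc⟩)
      · simp [PySem.Set.empty] at hx
      · obtain ⟨p, hp, rfl⟩ := List.mem_map.mp hc
        rw [sfSetF, PySem.Set.mem_ofList] at hxc
        exact ⟨p, hp, by simpa using hxc⟩
    · rintro ⟨p, hp, hx⟩
      refine Or.inr ⟨sfSetF p, List.mem_map.mpr ⟨p, hp, rfl⟩, ?_⟩
      rw [sfSetF, PySem.Set.mem_ofList]
      simpa using hx
  have hnodup : H.Nodup := nodup_foldl_update _ _ (by simp [PySem.Set.empty])
  set T : List Int := (List.range n).map (Nat.cast : Nat → Int) with hT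
  have hTnodup : T.Nodup := by
    rw [hT]
    exact (List.nodup_map_iff_inj_on List.nodup_range).mpr
      (fun x _ y _ h => by exact_mod_cast h)
  have hTlen : T.length = n := by simp [hT]
  have hsub : H ⊆ T := by
    intro x hx
    obtain ⟨p, hp, hcase⟩ := (hmem x).mp hx
    obtain ⟨hb1, hb2⟩ := hb p hp
    rcases hcase with rfl | rfl
    · exact List.mem_map.mpr ⟨p.1, List.mem_range.mpr hb1, rfl⟩
    · exact List.mem_map.mpr ⟨p.2, List.mem_range.mpr hb2, rfl⟩
  constructor
  · intro hlen v hv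
    have hfin : H.toFinset = T.toFinset := by
      apply Finset.eq_of_subset_of_card_le
      · intro x hx
        rw [List.mem_toFinset] at *
        exact hsub hx
      · rw [List.toFinset_card_of_nodup hnodup, List.toFinset_card_of_nodup hTnodup, hlen, hTlen]
    have hvH : (v : Int) ∈ H := by
      rw [← List.mem_toFinset, hfin, List.mem_toFinset, hT]
      exact List.mem_map.mpr ⟨v, List.mem_range.mpr hv, rfl⟩
    obtain ⟨p, hp, hcase⟩ := (hmem _).mp hvH
    exact ⟨p, hp, by rcases hcase with h | h <;> [left; right] <;> exact_mod_cast h⟩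
  · intro hcov
    have hsub2 : T ⊆ H := by
      intro x hx
      obtain ⟨v, hv, rfl⟩ := List.mem_map.mp hx
      obtain ⟨p, hp, hcase⟩ := hcov v (List.mem_range.mp hv)
      exact (hmem _).mpr ⟨p, hp, by rcases hcase with rfl | rfl <;> simp⟩
    have h1 := nodup_length_le H T hnodup hsub
    have h2 := nodup_length_le T H hTnodup hsub2
    omega

lemma sfMaskF_inj (p q : Nat × Nat) (hp : p.1 < p.2) (hq : q.1 < q.2)
    (h : sfMaskF p = sfMaskF q) : p = q := by
  have e1 : p.1 = q.1 ∨ p.1 = q.2 := by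
    have hv : (sfMaskF q).testBit p.1 = true := by rw [← h, testBit_sfMaskF]; simp
    rw [testBit_sfMaskF] at hv; simpa using hv
  have e2 : p.2 = q.1 ∨ p.2 = q.2 := by
    have hv : (sfMaskF q).testBit p.2 = true := by rw [← h, testBit_sfMaskF]; simp
    rw [testBit_sfMaskF] at hv; simpa using hv
  have e3 : q.1 = p.1 ∨ q.1 = p.2 := by
    have hv : (sfMaskF p).testBit q.1 = true := by rw [h, testBit_sfMaskF]; simp
    rw [testBit_sfMaskF] at hv; simpa using hv
  have e4 : q.2 = p.1 ∨ q.2 = p.2 := by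
    have hv : (sfMaskF p).testBit q.2 = true := by rw [h, testBit_sfMaskF]; simp
    rw [testBit_sfMaskF] at hv; simpa using hv
  have : p.1 = q.1 ∧ p.2 = q.2 := by omega
  exact Prod.ext this.1 this.2

lemma sfReachInv_step (edges : List Nat) (k : Nat) (reach : PySem.Set Nat)
    (h : sfReachInv edges k reach) :
    sfReachInv edges (k+1)
      (PySem.Set.ofList (reach.flatMap (fun s => edges.map (fun e => s ||| e)))) := by
  intro x
  rw [PySem.Set.mem_ofList, List.mem_flatMap]
  constructor
  · rintro ⟨s, hs, hx⟩
    simp only [List.mem_map] at hx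
    obtain ⟨e, he, rfl⟩ := hx
    obtain ⟨l, hlen, hmem, hfold⟩ := (h s).mp hs
    refine ⟨l ++ [e], by simp [hlen], ?_, ?_⟩
    · intro e' he'
      rcases List.mem_append.mp he' with h' | h'
      · exact hmem e' h'
      · rw [List.mem_singleton.mp h']; exact he
    · rw [List.foldl_append, hfold]
      rfl
  · rintro ⟨l, hlen, hmem, hfold⟩
    rcases List.eq_nil_or_concat l with rfl | ⟨l', e, rfl⟩
    · simp at hlen
    · refine ⟨l'.foldl (· ||| ·) 0, (h _).mpr ⟨l', by simpa using hlen, ?_, rfl⟩, ?_⟩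
      · intro e' he'; exact hmem e' (by simp [he'])
      · simp only [List.mem_map]
        exact ⟨e, hmem e (by simp), by rw [← hfold]; simp [List.concat_eq_append, List.foldl_append]⟩

lemma sfBounds_of_sub (routes : List (List Int)) (S : List (Nat × Nat))
    (hS : ∀ p ∈ S, p ∈ sfPairs routes) : ∀ p ∈ S, p.1 < routes.length ∧ p.2 < routes.length := by
  intro p hp
  have := sfPairs_bounds routes p (hS p hp)
  omega

lemma sfPA_to_seq (routes : List (List Int)) (k : Nat)
    (h : sfPA ((sfPairs routes).map sfSetF) routes.length k) :
    ∃ l : List Nat, l.length = k ∧ (∀ e ∈ l, e ∈ (sfPairs routes).map sfMaskF) ∧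
      l.foldl (· ||| ·) 0 = (1 <<< routes.length) - 1 := by
  obtain ⟨c, hc, hclen⟩ := h
  rw [PySem.List.combinations_map] at hc
  obtain ⟨S, hS, rfl⟩ := List.mem_map.mp hc
  obtain ⟨hsub, hlen⟩ := (PySem.List.mem_combinations_iff _ _ _).mp hS
  have hb := sfBounds_of_sub routes S (fun p hp => hsub.subset hp)
  have hcov : sfCovers routes.length S := (coverA_iff _ _ hb).mp hclen
  refine ⟨S.map sfMaskF, by simpa using hlen, ?_, (coverB_iff _ _ hb).mpr hcov⟩
  intro e he
  obtain ⟨p, hp, rfl⟩ := List.mem_map.mp he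
  exact List.mem_map.mpr ⟨p, hsub.subset hp, rfl⟩

lemma sfSeq_to_PA (routes : List (List Int)) (k : Nat) (hn : 1 ≤ routes.length)
    (l : List Nat) (hlen : l.length = k) (hmem : ∀ e ∈ l, e ∈ (sfPairs routes).map sfMaskF)
    (hor : l.foldl (· ||| ·) 0 = (1 <<< routes.length) - 1) :
    ∃ j, 1 ≤ j ∧ j ≤ k ∧ sfPA ((sfPairs routes).map sfSetF) routes.length j := by
  set S : List (Nat × Nat) := (sfPairs routes).filter (fun p => decide (sfMaskF p ∈ l)) with hSdef
  have hSsubl : S.Sublist (sfPairs routes) := List.filter_sublist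
  have hb := sfBounds_of_sub routes S (fun p hp => hSsubl.subset hp)
  have hcov : sfCovers routes.length S := by
    intro v hv
    have hbitv : (l.foldl (· ||| ·) 0).testBit v = true := by
      rw [hor, Nat.one_shiftLeft, Nat.testBit_two_pow_sub_one]
      simpa using hv
    rw [testBit_foldl_or] at hbitv
    simp only [Nat.zero_testBit, Bool.false_or, List.any_eq_true] at hbitv
    obtain ⟨e, he, hbe⟩ := hbitv
    obtain ⟨p, hp, rfl⟩ := List.mem_map.mp (hmem e he)
    refine ⟨p, ?_, ?_⟩
    · rw [hSdef, List.mem_filter]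
      exact ⟨hp, by simpa using he⟩
    · rw [testBit_sfMaskF] at hbe
      simpa using hbe
  have hSnodup : S.Nodup := (sfPairs_nodup routes).filter _
  have hmapnodup : (S.map sfMaskF).Nodup := by
    refine (List.nodup_map_iff_inj_on hSnodup).mpr ?_
    intro x hx y hy hxy
    exact sfMaskF_inj x y (sfPairs_bounds routes x (hSsubl.subset hx)).1
      (sfPairs_bounds routes y (hSsubl.subset hy)).1 hxy
  have hmapsub : (S.map sfMaskF) ⊆ l := by
    intro e he
    obtain ⟨p, hp, rfl⟩ := List.mem_map.mp he
    rw [hSdef, List.mem_filter] at hp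
    simpa using hp.2
  have hjk : S.length ≤ k := by
    have := nodup_length_le (S.map sfMaskF) l hmapnodup hmapsub
    simpa [hlen] using this
  have hj1 : 1 ≤ S.length := by
    obtain ⟨p, hp, -⟩ := hcov 0 hn
    have := List.ne_nil_of_mem hp
    have := List.length_pos_of_ne_nil this
    omega
  refine ⟨S.length, hj1, hjk, ?_⟩
  refine ⟨S.map sfSetF, ?_, (coverA_iff _ _ hb).mpr hcov⟩
  rw [PySem.List.combinations_map]
  exact List.mem_map.mpr ⟨S, (PySem.List.mem_combinations_iff _ _ _).mpr ⟨hSsubl, rfl⟩, rfl⟩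

lemma loops_eq (routes : List (List Int)) :
    ∀ (cnt k : Nat) (reach : PySem.Set Nat), 1 ≤ k → k + cnt = routes.length + 1 →
    sfReachInv ((sfPairs routes).map sfMaskF) (k-1) reach →
    (∀ j, 1 ≤ j → j < k → ¬ sfPA ((sfPairs routes).map sfSetF) routes.length j) →
    solFailedLoopA ((sfPairs routes).map sfSetF) routes.length
        (PySem.List.pyRange (k : Int) ((routes.length : Int) + 1) 1)
      = solFailedLoopB ((sfPairs routes).map sfMaskF) ((1 <<< routes.length) - 1)
          routes.length reach
          (PySem.List.pyRange (k : Int) ((routes.length : Int) + 1) 1) := by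
  intro cnt
  induction cnt with
  | zero =>
    intro k reach hk1 hkcnt hinv hnotyet
    rw [PySem.List.pyRange_one_eq_nil (by omega)]
    simp [solFailedLoopA, solFailedLoopB]
  | succ cnt ih =>
    intro k reach hk1 hkcnt hinv hnotyet
    have hkn : k ≤ routes.length := by omega
    rw [PySem.List.pyRange_one_cons (by omega)]
    simp only [solFailedLoopA, solFailedLoopB]
    have hinv' : sfReachInv ((sfPairs routes).map sfMaskF) k
        (PySem.Set.ofList (reach.flatMap
          (fun s => ((sfPairs routes).map sfMaskF).map (fun e => s ||| e)))) := by
      have := sfReachInv_step ((sfPairs routes).map sfMaskF) (k-1) reach hinv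
      rwa [show k - 1 + 1 = k by omega] at this
    have hiff : sfPA ((sfPairs routes).map sfSetF) routes.length k ↔
        PySem.Set.contains (PySem.Set.ofList (reach.flatMap
          (fun s => ((sfPairs routes).map sfMaskF).map (fun e => s ||| e))))
          ((1 <<< routes.length) - 1) = true := by
      rw [PySem.Set.contains_iff]
      constructor
      · intro hPA
        obtain ⟨l, hlen, hmem, hor⟩ := sfPA_to_seq routes k hPA
        exact (hinv' _).mpr ⟨l, hlen, hmem, hor⟩
      · intro hfull
        obtain ⟨l, hlen, hmem, hor⟩ := (hinv' _).mp hfull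
        obtain ⟨j, hj1, hjk, hPAj⟩ := sfSeq_to_PA routes k (by omega) l hlen hmem hor
        rcases Nat.lt_or_ge j k with hlt | hge
        · exact absurd hPAj (hnotyet j hj1 hlt)
        · rwa [show j = k by omega] at hPAj
    have hAtest : ((PySem.List.combinations ((sfPairs routes).map sfSetF)
          ((k : Int)).toNat).map (fun comb =>
            comb.foldl (fun hap c => PySem.Set.update hap c) PySem.Set.empty)).any
          (fun hap => hap.length == routes.length) = true
        ↔ sfPA ((sfPairs routes).map sfSetF) routes.length k := by
      rw [List.any_map]
      simp only [Int.toNat_natCast, List.any_eq_true, Function.comp_def, beq_iff_eq]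
      exact Iff.rfl
    by_cases hPA : sfPA ((sfPairs routes).map sfSetF) routes.length k
    · rw [if_pos (hAtest.mpr hPA), if_pos (hiff.mp hPA)]
    · rw [if_neg (fun hc => hPA (hAtest.mp hc)), if_neg (fun hc => hPA (hiff.mpr hc))]
      have hcast : ((k : Int) + 1) = (((k + 1 : Nat)) : Int) := by push_cast; ring
      rw [hcast]
      apply ih (k+1) _ (by omega) (by omega) (by simpa using hinv')
      intro j hj1 hjlt
      rcases Nat.lt_or_ge j k with hlt | hge
      · exact hnotyet j hj1 hlt
      · rw [show j = k by omega]
        exact hPA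

lemma sfReachInv_zero (edges : List Nat) : sfReachInv edges 0 (PySem.Set.ofList [0]) := by
  intro x
  constructor
  · intro hx
    rw [PySem.Set.mem_ofList] at hx
    simp only [List.mem_singleton] at hx
    exact ⟨[], rfl, by simp, hx.symm⟩
  · rintro ⟨l, hl, -, hx⟩
    rw [List.length_eq_zero_iff] at hl; subst hl
    rw [PySem.Set.mem_ofList]
    simp [← hx]

-- ===== VERDICT (by name: the statement is the Claim_ definition above) =====
theorem solution_failed_spec : Claim_equal_solution_failed := by
  intro routes _ _
  unfold Spec_solution_failed solution_failed solution_failed_alt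
  rw [sfListSet_eq, sfEdges_eq]
  exact loops_eq routes routes.length 1 (PySem.Set.ofList [0]) le_rfl (by omega)
    (sfReachInv_zero _) (by intro j h1 h2; omega)
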